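-- pv_equiv track=rewrite | github.com/kengiroy2-g/kenobase | kenobase/scraper/parsers.py | _is_valid_keno_selection
-- ===== SOURCE A (Python) =====
-- def _is_valid_keno_selection(numbers: list[int]) -> bool:
--     """Check if numbers look like a valid KENO selection."""
--     if not numbers:
--         return False
--
--     unique_numbers = set(numbers)
--
--     # Must have 2-10 unique numbers
--     if not (2 <= len(unique_numbers) <= 10):
--         return False
--
--     # All numbers must be 1-70
--     if not all(1 <= n <= 70 for n in unique_numbers):
--         return False
--
--     # Reject if it looks like a range (1,2,3,4,5... or 60,61,62...)
--     sorted_nums = sorted(unique_numbers)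
--     consecutive_count = sum(
--         1 for i in range(len(sorted_nums) - 1)
--         if sorted_nums[i + 1] - sorted_nums[i] == 1
--     )
--     if consecutive_count >= len(sorted_nums) - 1 and len(sorted_nums) > 3:
--         return False
--
--     return True
-- ===== SOURCE B (Python) =====
-- def _is_valid_keno_selection(numbers: list[int]) -> bool:
--     """Check if numbers look like a valid KENO selection."""
--     if not numbers:
--         return False
--     unique = set(numbers)
--     k = len(unique)
--     if not (2 <= k <= 10):
--         return False
--     if not all(1 <= n <= 70 for n in unique):
--         return False
--     # contiguous run of k distinct numbers <=> max - min == k - 1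
--     return not (k > 3 and max(unique) - min(unique) == k - 1)
-- ===== Notes on version B (the rewrite author's own statement) =====
-- stated objective: simpler
-- what changed: The sort plus adjacent-pair-difference count is replaced by a closed-form contiguity test: k distinct numbers form a consecutive run iff max - min == k - 1, so B needs no sorting and no index scan.
import Mathlib
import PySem

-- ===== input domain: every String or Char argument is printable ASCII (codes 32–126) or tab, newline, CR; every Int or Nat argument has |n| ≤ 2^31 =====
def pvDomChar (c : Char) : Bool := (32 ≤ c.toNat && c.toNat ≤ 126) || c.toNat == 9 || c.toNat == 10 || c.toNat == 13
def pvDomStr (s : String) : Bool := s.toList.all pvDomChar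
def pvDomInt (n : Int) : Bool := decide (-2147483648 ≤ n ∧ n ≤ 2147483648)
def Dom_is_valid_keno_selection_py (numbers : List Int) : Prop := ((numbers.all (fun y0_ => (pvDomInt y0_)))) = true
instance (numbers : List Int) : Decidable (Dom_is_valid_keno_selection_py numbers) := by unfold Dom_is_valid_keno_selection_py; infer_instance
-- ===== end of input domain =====

-- B replaces A's sort + adjacent-difference scan by the closed-form contiguity test
-- max - min == k - 1 on the k distinct numbers (objective: simpler).

-- ===== PORT A =====
def is_valid_keno_selection_py (numbers : List Int) : Bool :=
  if numbers = [] then false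
  else
    let unique_numbers : PySem.Set Int := PySem.Set.ofList numbers
    if !(decide (2 ≤ unique_numbers.length) && decide (unique_numbers.length ≤ 10)) then false
    else if !(unique_numbers.all (fun n => decide (1 ≤ n) && decide (n ≤ 70))) then false
    else
      let sorted_nums := PySem.List.sorted unique_numbers (fun x => x) false
      -- indices i and i+1 are always in range, so pyGetD is exact here
      let consecutive_count : Int :=
        (PySem.List.pyRange 0 ((sorted_nums.length : Int) - 1) 1).foldl
          (fun acc i =>
            if PySem.List.pyGetD sorted_nums (i + 1) 0 - PySem.List.pyGetD sorted_nums i 0 = 1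
            then acc + 1 else acc) 0
      if consecutive_count ≥ (sorted_nums.length : Int) - 1 ∧ (sorted_nums.length : Int) > 3
      then false
      else true

-- ===== PORT B =====
def is_valid_keno_selection_py_alt (numbers : List Int) : Bool :=
  match numbers with
  | [] => false
  | _ :: _ =>
    let unique : PySem.Set Int := PySem.Set.ofList numbers
    let k := unique.length
    if !(decide (2 ≤ k) && decide (k ≤ 10)) then false
    else if !(unique.all (fun n => decide (1 ≤ n) && decide (n ≤ 70))) then false
    else
      -- unique is nonempty here, so the none branches are unreachable totality guards
      match PySem.List.min? unique (fun x => x), PySem.List.max? unique (fun x => x) with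
      | some lo, some hi => !(decide (k > 3) && decide (hi - lo = (k : Int) - 1))
      | _, _ => false

-- ===== PRECONDITION & SPEC =====
def Spec_is_valid_keno_selection_py (numbers : List Int) (out : Bool) : Prop := out = is_valid_keno_selection_py_alt numbers
instance (numbers : List Int) (out : Bool) : Decidable (Spec_is_valid_keno_selection_py numbers out) := by unfold Spec_is_valid_keno_selection_py; infer_instance

-- ===== CLAIM (what is proved, stated in full; the proofs are below) =====
def Claim_equal_is_valid_keno_selection_py : Prop := ∀ (numbers : List Int), Dom_is_valid_keno_selection_py numbers → Spec_is_valid_keno_selection_py numbers (is_valid_keno_selection_py numbers)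

-- ===== LEMMAS AND PROOFS =====

/-- Structural form of A's adjacent-pair count: number of gaps equal to 1. -/
def ccAux : List Int → Int
  | a :: b :: t => (if b - a = 1 then 1 else 0) + ccAux (b :: t)
  | _ => 0

theorem cc_eq_ccAux (s : List Int) (c : Int) :
    (List.range (s.length - 1)).foldl
      (fun acc k => if s.getD (k + 1) 0 - s.getD k 0 = 1 then acc + 1 else acc) c
      = c + ccAux s := by
  induction s generalizing c with
  | nil => simp [ccAux]
  | cons a t ih =>
    cases t with
    | nil => simp [ccAux]
    | cons b t' =>
      have h : (a :: b :: t').length - 1 = (b :: t').length - 1 + 1 := by simp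
      rw [h, List.range_succ_eq_map, List.foldl_cons, List.foldl_map]
      simp only [Nat.succ_eq_add_one, List.getD_cons_succ, List.getD_cons_zero]
      have hf : (fun (x : Int) (y : Nat) => if t'.getD y 0 - (b :: t').getD y 0 = 1 then x + 1 else x)
          = (fun acc k => if (b :: t').getD (k + 1) 0 - (b :: t').getD k 0 = 1 then acc + 1 else acc) := by
        funext x y; simp
      rw [hf, ih]
      simp only [ccAux]
      split_ifs <;> ring

/-- For a strictly increasing nonempty list: the gap count is at most the number of
gaps, the span is at least the number of gaps, and both are tight together. -/
theorem chain_lemma (a : Int) (t : List Int) (h : (a :: t).Pairwise (· < ·)) :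
    ccAux (a :: t) ≤ (t.length : Int) ∧
    (t.length : Int) ≤ (a :: t).getLastD 0 - a ∧
    (ccAux (a :: t) = (t.length : Int) ↔ (a :: t).getLastD 0 - a = (t.length : Int)) := by
  induction t generalizing a with
  | nil => simp [ccAux]
  | cons b t' ih =>
    have hab : a < b := (List.pairwise_cons.mp h).1 b (by simp)
    have ih' := ih b (List.pairwise_cons.mp h).2
    simp only [ccAux, List.getLastD_cons, List.length_cons] at *
    push_cast at *
    split_ifs with hone <;> omega

theorem mem_le_getLastD (s : List Int) (h : s.Pairwise (· < ·)) :
    ∀ y ∈ s, y ≤ s.getLastD 0 := by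
  induction s with
  | nil => intro y hy; simp at hy
  | cons a t ih =>
    intro y hy
    cases t with
    | nil => simp at hy; simp [hy]
    | cons c t' =>
      rcases List.mem_cons.mp hy with rfl | hyt
      · have hac : y < c := (List.pairwise_cons.mp h).1 c (by simp)
        have := ih (List.pairwise_cons.mp h).2 c (by simp)
        simp only [List.getLastD_cons] at *
        omega
      · have := ih (List.pairwise_cons.mp h).2 y hyt
        simpa using this

/-- A's pyRange/pyGetD fold computes `ccAux` of the sorted list. -/
theorem cc_pyRange (s : List Int) :
    (PySem.List.pyRange 0 ((s.length : Int) - 1) 1).foldl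
      (fun acc i =>
        if PySem.List.pyGetD s (i + 1) 0 - PySem.List.pyGetD s i 0 = 1
        then acc + 1 else acc) (0 : Int) = ccAux s := by
  rw [PySem.List.pyRange_one, List.foldl_map]
  have hf : (fun (x : Int) (y : Nat) =>
        if PySem.List.pyGetD s (0 + (y : Int) + 1) 0 - PySem.List.pyGetD s (0 + (y : Int)) 0 = 1
        then x + 1 else x)
      = (fun acc k => if s.getD (k + 1) 0 - s.getD k 0 = 1 then acc + 1 else acc) := by
    funext x y
    have h1 : (0 : Int) + (y : Int) + 1 = ((y + 1 : Nat) : Int) := by push_cast; ring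
    have h2 : (0 : Int) + (y : Int) = ((y : Nat) : Int) := by ring
    rw [h1, h2, PySem.List.pyGetD_natCast, PySem.List.pyGetD_natCast]
  have hn : (((s.length : Int) - 1) - 0).toNat = s.length - 1 := by omega
  rw [hn, hf, cc_eq_ccAux]
  ring

/-- Core equivalence of the two contiguity tests, on the sorted dedup list. -/
theorem cond_equiv (u : List Int) (hu : u ≠ []) (hp : (PySem.List.sorted u (fun x => x) false).Pairwise (· < ·))
    (lo hi : Int)
    (hlo : PySem.List.min? u (fun x => x) = some lo)
    (hhi : PySem.List.max? u (fun x => x) = some hi) :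
    ((PySem.List.pyRange 0 (((PySem.List.sorted u (fun x => x) false).length : Int) - 1) 1).foldl
        (fun acc i =>
          if PySem.List.pyGetD (PySem.List.sorted u (fun x => x) false) (i + 1) 0
              - PySem.List.pyGetD (PySem.List.sorted u (fun x => x) false) i 0 = 1
          then acc + 1 else acc) (0 : Int)
        ≥ (((PySem.List.sorted u (fun x => x) false).length : Int) - 1)
      ∧ (((PySem.List.sorted u (fun x => x) false).length : Int) > 3))
      ↔ (u.length > 3 ∧ hi - lo = (u.length : Int) - 1) := by
  set s := PySem.List.sorted u (fun x => x) false with hs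
  have hperm : s.Perm u := PySem.List.sorted_perm u (fun x => x) false
  have hlen : s.length = u.length := hperm.length_eq
  rw [cc_pyRange]
  obtain ⟨a, t, hat⟩ : ∃ a t, s = a :: t := by
    cases hsc : s with
    | nil => exact absurd (List.Perm.eq_nil (hsc ▸ hperm.symm)) hu
    | cons a t => exact ⟨a, t, rfl⟩
  have hpat : (a :: t).Pairwise (· < ·) := hat ▸ hp
  obtain ⟨hcc_le, hspan, hiff⟩ := chain_lemma a t hpat
  -- hi is the last element of s
  have hgl_mem : (a :: t).getLastD 0 ∈ (a :: t) := by
    cases t with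
    | nil => simp
    | cons c t' =>
      have := List.getLast_mem (l := a :: c :: t') (by simp)
      simp [List.getLastD_eq_getLast?, List.getLast?_eq_some_getLast]
  have hhi_max : ∀ y ∈ u, y ≤ hi := fun y hy => PySem.List.max?_isMax hhi y hy
  have hhi_mem : hi ∈ u := PySem.List.max?_mem hhi
  have hgl_hi : (a :: t).getLastD 0 = hi := by
    have h1 : (a :: t).getLastD 0 ≤ hi :=
      hhi_max _ (hperm.subset (hat ▸ hgl_mem))
    have h2 : hi ≤ (a :: t).getLastD 0 :=
      mem_le_getLastD _ hpat hi (by rw [← hat] at *; exact hperm.symm.subset hhi_mem)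
    omega
  -- lo is the head of s
  have hlo_min : ∀ y ∈ u, lo ≤ y := fun y hy => PySem.List.min?_isMin hlo y hy
  have hlo_mem : lo ∈ u := PySem.List.min?_mem hlo
  have ha_lo : a = lo := by
    have h1 : lo ≤ a := hlo_min a (hperm.subset (by rw [hat]; simp))
    have h2 : a ≤ lo := by
      have hlos : lo ∈ a :: t := hat ▸ hperm.symm.subset hlo_mem
      rcases List.mem_cons.mp hlos with rfl | hlt
      · exact le_refl _
      · exact le_of_lt ((List.pairwise_cons.mp hpat).1 lo hlt)
    omega
  have E4 : t.length + 1 = u.length := by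
    rw [hat] at hlen; simpa using hlen
  have E2 : (t.length : Int) ≤ hi - lo := by
    rw [← hgl_hi, ← ha_lo]; exact hspan
  have E3 : ccAux (a :: t) = (t.length : Int) ↔ hi - lo = (t.length : Int) := by
    rw [← hgl_hi, ← ha_lo]; exact hiff
  rw [hat]
  simp only [List.length_cons]
  constructor
  · rintro ⟨h1, h2⟩
    have hcc : ccAux (a :: t) = (t.length : Int) := by push_cast at h1; omega
    have hhl := E3.mp hcc
    refine ⟨by omega, by omega⟩
  · rintro ⟨h1, h2⟩
    have hhl : hi - lo = (t.length : Int) := by omega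
    have hcc := E3.mpr hhl
    refine ⟨by push_cast; omega, by push_cast; omega⟩

-- ===== VERDICT (by name: the statement is the Claim_ definition above) =====
theorem is_valid_keno_selection_py_spec : Claim_equal_is_valid_keno_selection_py := by
  intro numbers _
  unfold Spec_is_valid_keno_selection_py
  cases hn : numbers with
  | nil => simp [is_valid_keno_selection_py, is_valid_keno_selection_py_alt]
  | cons x xs =>
    simp only [is_valid_keno_selection_py, is_valid_keno_selection_py_alt]
    rw [if_neg (by simp)]
    set u := PySem.Set.ofList (x :: xs) with hu
    have hx : x ∈ u := by rw [hu]; exact (PySem.Set.mem_ofList _ _).mpr (by simp)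
    have hune : u ≠ [] := fun h => by simp [h] at hx
    by_cases hg1 : (!(decide (2 ≤ u.length) && decide (u.length ≤ 10))) = true
    · simp only [hg1, if_true]
    · simp only [hg1, Bool.not_eq_true] at *
      by_cases hg2 : (!(u.all (fun n => decide (1 ≤ n) && decide (n ≤ 70)))) = true
      · simp only [hg2, if_true]
      · simp only [hg2, Bool.not_eq_true] at *
        simp only [if_false, Bool.false_eq_true]
        obtain ⟨lo, hlo⟩ : ∃ lo, PySem.List.min? u (fun x => x) = some lo := by
          cases hmin : PySem.List.min? u (fun x => x) with
          | none => exact absurd ((PySem.List.min?_eq_none_iff _ _).mp hmin) hune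
          | some lo => exact ⟨lo, rfl⟩
        obtain ⟨hi, hhi⟩ : ∃ hi, PySem.List.max? u (fun x => x) = some hi := by
          cases hmax : PySem.List.max? u (fun x => x) with
          | none => exact absurd ((PySem.List.max?_eq_none_iff _ _).mp hmax) hune
          | some hi => exact ⟨hi, rfl⟩
        rw [hlo, hhi]
        have hp : (PySem.List.sorted u (fun x => x) false).Pairwise (· < ·) := by
          rw [hu]; exact PySem.List.sorted_ofList_pairwise_lt (x :: xs)
        have hce := cond_equiv u hune hp lo hi hlo hhi
        by_cases hc : (u.length > 3 ∧ hi - lo = (u.length : Int) - 1)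
        · rw [if_pos (hce.mpr hc)]
          simp [hc.1, hc.2]
        · rw [if_neg (fun h => hc (hce.mp h))]
          rcases Classical.em (u.length > 3) with h3 | h3
          · simp only [h3, decide_true, Bool.true_and]
            have : ¬ (hi - lo = (u.length : Int) - 1) := fun h => hc ⟨h3, h⟩
            simp [this]
          · simp [h3]
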